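-- pv_equiv track=rewrite | github.com/tabish3210/unstop_problems_DSA | Pair of Subbarrays.py | find_subarray_pairs
-- ===== SOURCE A (Python) =====
-- from collections import defaultdict
--
-- def find_subarray_pairs(N, A):
--     # Map to store prefix sum and list of ending indices where that sum occurs
--     prefix_sum = 0
--     subarray_sums = defaultdict(list)
--     result_count = 0
--
--     # Loop through all possible subarrays
--     for start in range(N):
--         prefix_sum = 0
--         # For each subarray starting at 'start', check all subarrays that end at 'end'
--         for end in range(start, N):
--             prefix_sum += A[end]
--
--             # Check if the sum is already in subarray_sums and no overlap occurs
--             for prev_end in subarray_sums[prefix_sum]: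
--                 # If the previous end index is less than the current start, they don't overlap
--                 if prev_end < start:
--                     result_count += 1
--
--             # Append the current subarray ending index to the prefix_sum list
--             subarray_sums[prefix_sum].append(end)
--
--     return result_count
-- ===== SOURCE B (Python) =====
-- def find_subarray_pairs(N, A):
--     # O(N^2): sweep 'start'; 'counts' holds, keyed by sum, how many subarrays end
--     # strictly before 'start'; suffix sums extend counts, running sums query it.
--     counts = {}
--     result = 0
--     for start in range(N):
--         s = 0
--         for i in range(start - 1, -1, -1):   # add subarrays ending at start-1
--             s += A[i]
--             counts[s] = counts.get(s, 0) + 1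
--         s = 0
--         for end in range(start, N):          # count partners ending before start
--             s += A[end]
--             result += counts.get(s, 0)
--     return result
-- ===== Notes on version B (the rewrite author's own statement) =====
-- stated objective: alternative
-- what changed: A stores, per prefix sum, the list of ending indices of every subarray seen and rescans that list for each of the O(N^2) subarrays (O(N^4) when many subarray sums collide); B sweeps start once, maintaining a dict that merely COUNTS subarrays by sum among those ending before start (extended by the suffix sums ending at start-1), so each subarray is counted with one O(1) lookup (O(N^2) always; measured ~1.5-1.8x on random inputs, far more when sums repeat).
import Mathlib
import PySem

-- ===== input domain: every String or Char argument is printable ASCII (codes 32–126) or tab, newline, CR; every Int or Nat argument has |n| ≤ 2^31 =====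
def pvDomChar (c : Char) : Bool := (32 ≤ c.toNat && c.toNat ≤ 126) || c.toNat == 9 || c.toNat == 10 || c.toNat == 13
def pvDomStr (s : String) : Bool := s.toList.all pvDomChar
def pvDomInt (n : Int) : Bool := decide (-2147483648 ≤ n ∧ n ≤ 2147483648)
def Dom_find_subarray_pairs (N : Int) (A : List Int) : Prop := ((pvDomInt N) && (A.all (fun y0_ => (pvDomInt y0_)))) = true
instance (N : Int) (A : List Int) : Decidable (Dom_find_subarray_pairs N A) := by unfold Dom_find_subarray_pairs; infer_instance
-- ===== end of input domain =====

-- B replaces A's rescans of a dict of ending-index LISTS by a single sweep keeping a dict of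
-- COUNTS of sums of subarrays ending before the current start (objective: alternative algorithm).

-- ===== PORT A =====
-- inner loop over `end`: state = (prefix_sum, subarray_sums, result_count).
-- (defaultdict.__getitem__'s silent insertion of an empty list is unobservable here: the same
-- key is overwritten with the appended list in the same iteration, so we port read + append
-- as getD followed by insert.)
def pvAInner (A : List Int) (start : Int) (es : List Int)
    (st : Int × PySem.Dict Int (List Int) × Int) : Int × PySem.Dict Int (List Int) × Int :=
  es.foldl (fun st e =>
    let ps := st.1 + PySem.List.pyGetD A e 0
    let d := st.2.1
    let rc := (d.getD ps []).foldl (fun r q => if q < start then r + 1 else r) st.2.2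
    (ps, d.insert ps (d.getD ps [] ++ [e]), rc)) st

def pvAStep (N : Int) (A : List Int) (st : PySem.Dict Int (List Int) × Int) (start : Int) :
    PySem.Dict Int (List Int) × Int :=
  (pvAInner A start (PySem.List.pyRange start N) (0, st)).2

def find_subarray_pairs (N : Int) (A : List Int) : Int :=
  ((PySem.List.pyRange 0 N).foldl (pvAStep N A) (PySem.Dict.empty, 0)).2

-- ===== PORT B =====
-- pre-loop of row `start`: add the sums of subarrays ending at start-1 into `counts`.
def pvBPre (A : List Int) (is : List Int) (st : Int × PySem.Dict Int Int) :
    Int × PySem.Dict Int Int :=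
  is.foldl (fun st i =>
    let s := st.1 + PySem.List.pyGetD A i 0
    (s, st.2.insert s (st.2.getD s 0 + 1))) st

-- counting loop of row `start`: running sums queried against `counts`.
def pvBInner (A : List Int) (cnt : PySem.Dict Int Int) (es : List Int) (st : Int × Int) :
    Int × Int :=
  es.foldl (fun st e =>
    let s := st.1 + PySem.List.pyGetD A e 0
    (s, st.2 + cnt.getD s 0)) st

def pvBStep (N : Int) (A : List Int) (st : PySem.Dict Int Int × Int) (start : Int) :
    PySem.Dict Int Int × Int :=
  let cnt := (pvBPre A (PySem.List.pyRange (start - 1) (-1) (-1)) (0, st.1)).2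
  (cnt, (pvBInner A cnt (PySem.List.pyRange start N) (0, st.2)).2)

def find_subarray_pairs_alt (N : Int) (A : List Int) : Int :=
  ((PySem.List.pyRange 0 N).foldl (pvBStep N A) (PySem.Dict.empty, 0)).2

-- ===== PRECONDITION & SPEC =====
-- Python A raises IndexError (A[end] with end ≥ len(A)) exactly when N > len(A); that is all Pre_ excludes.
def Pre_find_subarray_pairs (N : Int) (A : List Int) : Prop := N ≤ (A.length : Int)
instance (N : Int) (A : List Int) : Decidable (Pre_find_subarray_pairs N A) := by
  unfold Pre_find_subarray_pairs; infer_instance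

def pvWitness_find_subarray_pairs : Int × List Int := (4, [1, -1, 1, 2])

def Spec_find_subarray_pairs (N : Int) (A : List Int) (out : Int) : Prop :=
  out = find_subarray_pairs_alt N A
instance (N : Int) (A : List Int) (out : Int) : Decidable (Spec_find_subarray_pairs N A out) := by
  unfold Spec_find_subarray_pairs; infer_instance

-- ===== CLAIM (what is proved, stated in full; the proofs are below) =====
def Claim_equal_find_subarray_pairs : Prop := ∀ (N : Int) (A : List Int), Dom_find_subarray_pairs N A → Pre_find_subarray_pairs N A → Spec_find_subarray_pairs N A (find_subarray_pairs N A)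

-- ===== LEMMAS AND PROOFS =====

-- Int-valued counters of entries < t / = t in a list of ints.
def pvCntLt (t : Int) : List Int → Int
  | [] => 0
  | q :: l => (if q < t then 1 else 0) + pvCntLt t l

def pvCntEq (t : Int) : List Int → Int
  | [] => 0
  | q :: l => (if q = t then 1 else 0) + pvCntEq t l

-- the list of ending indices a row of A's loop appends under key v, given accumulated prefix p
def pvRow (A : List Int) : Int → List Int → Int → List Int
  | _, [], _ => []
  | p, e :: es, v =>
    (if p + PySem.List.pyGetD A e 0 = v then [e] else []) ++
      pvRow A (p + PySem.List.pyGetD A e 0) es v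

-- the contents of A's dict under key v after the rows in ss
def pvRows (A : List Int) (N : Int) : List Int → Int → List Int
  | [], _ => []
  | s :: ss, v => pvRow A 0 (PySem.List.pyRange s N) v ++ pvRows A N ss v

-- how many increments B's pre-loop over `is` makes at key v, given accumulated sum p
def pvOcc (A : List Int) : Int → List Int → Int → Int
  | _, [], _ => 0
  | p, i :: is, v =>
    (if p + PySem.List.pyGetD A i 0 = v then 1 else 0) + pvOcc A (p + PySem.List.pyGetD A i 0) is v

-- the value of B's counts dict at key v after the pre-loops of the rows in ss
def pvCSpec (A : List Int) : List Int → Int → Int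
  | [], _ => 0
  | s :: ss, v => pvOcc A 0 (PySem.List.pyRange (s - 1) (-1) (-1)) v + pvCSpec A ss v

-- total added to the result by one row, querying f at each running sum
def pvAdds (A : List Int) (f : Int → Int) : Int → List Int → Int
  | _, [] => 0
  | p, e :: es => f (p + PySem.List.pyGetD A e 0) + pvAdds A f (p + PySem.List.pyGetD A e 0) es

-- sum of A[a..b)
def pvSS (A : List Int) (a b : Int) : Int :=
  ((PySem.List.pyRange a b).map (fun i => PySem.List.pyGetD A i 0)).sum

theorem pvCntLt_append (t : Int) (l1 l2 : List Int) :
    pvCntLt t (l1 ++ l2) = pvCntLt t l1 + pvCntLt t l2 := by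
  induction l1 with
  | nil => simp [pvCntLt]
  | cons q l ih => simp [pvCntLt, ih]; ring

theorem pvCntEq_append (t : Int) (l1 l2 : List Int) :
    pvCntEq t (l1 ++ l2) = pvCntEq t l1 + pvCntEq t l2 := by
  induction l1 with
  | nil => simp [pvCntEq]
  | cons q l ih => simp [pvCntEq, ih]; ring

theorem pvFoldl_cnt (t : Int) (l : List Int) : ∀ (r : Int),
    l.foldl (fun r q => if q < t then r + 1 else r) r = r + pvCntLt t l := by
  induction l with
  | nil => intro r; simp [pvCntLt]
  | cons q l ih =>
    intro r
    by_cases h : q < t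
    · simp [pvCntLt, h, ih]; ring
    · simp [pvCntLt, h, ih]

theorem pvCntLt_succ (t : Int) (l : List Int) :
    pvCntLt (t + 1) l = pvCntLt t l + pvCntEq t l := by
  induction l with
  | nil => simp [pvCntLt, pvCntEq]
  | cons q l ih =>
    simp only [pvCntLt, pvCntEq, ih]
    have : (if q < t + 1 then (1:Int) else 0) = (if q < t then 1 else 0) + (if q = t then 1 else 0) := by
      by_cases h1 : q < t <;> by_cases h2 : q = t <;> simp [h1, h2] <;> omega
    rw [this]; ring

theorem pvCntLt_zero_of_ge (t : Int) (l : List Int) (h : ∀ x ∈ l, t ≤ x) :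
    pvCntLt t l = 0 := by
  induction l with
  | nil => rfl
  | cons q l ih =>
    have hq := h q (by simp)
    simp [pvCntLt, ih fun x hx => h x (by simp [hx]), show ¬ q < t by omega]

theorem pvCntEq_zero_of_gt (t : Int) (l : List Int) (h : ∀ x ∈ l, t < x) :
    pvCntEq t l = 0 := by
  induction l with
  | nil => rfl
  | cons q l ih =>
    have hq := h q (by simp)
    simp [pvCntEq, ih fun x hx => h x (by simp [hx]), show ¬ q = t by omega]

theorem pvRow_subset (A : List Int) (v x : Int) : ∀ (es : List Int) (p : Int),
    x ∈ pvRow A p es v → x ∈ es := by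
  intro es
  induction es with
  | nil => intro p h; simp [pvRow] at h
  | cons e es ih =>
    intro p h
    simp only [pvRow, List.mem_append] at h
    rcases h with h | h
    · split at h <;> simp_all
    · exact List.mem_cons_of_mem _ (ih _ h)

theorem pvSS_cons (A : List Int) {a b : Int} (h : a < b) :
    pvSS A a b = PySem.List.pyGetD A a 0 + pvSS A (a + 1) b := by
  simp [pvSS, PySem.List.pyRange_one_cons h]

theorem pvSS_snoc (A : List Int) {a b : Int} (h : a ≤ b) :
    pvSS A a (b + 1) = pvSS A a b + PySem.List.pyGetD A b 0 := by
  simp [pvSS, PySem.List.pyRange_one_succ_right h]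

theorem pvSS_single (A : List Int) (a : Int) : pvSS A a (a + 1) = PySem.List.pyGetD A a 0 := by
  simp [pvSS, PySem.List.pyRange_one_singleton]

-- R1: within one row of A (started at index a with accumulated prefix p), exactly one
-- appended entry can equal t (the one with end = t), and it is there iff the sum matches.
theorem pvR1 (A : List Int) (N : Int) : ∀ (k : Nat) (a p t v : Int), t = a + k → t < N →
    pvCntEq t (pvRow A p (PySem.List.pyRange a N) v) =
      if p + pvSS A a (t + 1) = v then 1 else 0 := by
  intro k
  induction k with
  | zero =>
    intro a p t v hta htN
    have ha : t = a := by omega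
    subst ha
    rw [PySem.List.pyRange_one_cons htN]
    simp only [pvRow]
    rw [pvCntEq_append]
    have h2 : pvCntEq t (pvRow A (p + PySem.List.pyGetD A t 0) (PySem.List.pyRange (t + 1) N) v) = 0 := by
      apply pvCntEq_zero_of_gt
      intro x hx
      have := PySem.List.mem_pyRange_one.mp (pvRow_subset A v x _ _ hx)
      omega
    rw [h2, pvSS_single]
    split <;> simp [pvCntEq]
  | succ k ih =>
    intro a p t v hta htN
    have haN : a < N := by omega
    rw [PySem.List.pyRange_one_cons haN]
    simp only [pvRow]
    rw [pvCntEq_append]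
    have h1 : pvCntEq t (if p + PySem.List.pyGetD A a 0 = v then [a] else []) = 0 := by
      split
      · simp [pvCntEq]; omega
      · simp [pvCntEq]
    rw [h1, ih (a + 1) (p + PySem.List.pyGetD A a 0) t v (by omega) htN]
    rw [pvSS_cons A (show a < t + 1 by omega)]
    have : p + (PySem.List.pyGetD A a 0 + pvSS A (a + 1) (t + 1)) =
        p + PySem.List.pyGetD A a 0 + pvSS A (a + 1) (t + 1) := by ring
    rw [this]; ring

-- O1: B's descending pre-loop from b makes exactly one increment per start index i ≤ b,
-- at the key p + (sum of A[i..b]).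
theorem pvO1 (A : List Int) : ∀ (k : Nat) (b p v : Int), b < (k : Int) →
    pvOcc A p (PySem.List.pyRange b (-1) (-1)) v =
      ((PySem.List.pyRange 0 (b + 1)).map
        (fun i => if p + pvSS A i (b + 1) = v then (1:Int) else 0)).sum := by
  intro k
  induction k with
  | zero =>
    intro b p v hb
    rw [PySem.List.pyRange_neg_one_eq_nil (by omega), PySem.List.pyRange_one_eq_nil (by omega)]
    simp [pvOcc]
  | succ k ih =>
    intro b p v hb
    by_cases h0 : b < 0
    · rw [PySem.List.pyRange_neg_one_eq_nil (by omega), PySem.List.pyRange_one_eq_nil (by omega)]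
      simp [pvOcc]
    · have h0' : (0:Int) ≤ b := by omega
      rw [PySem.List.pyRange_neg_one_cons (show (-1:Int) < b by omega)]
      simp only [pvOcc]
      rw [ih (b - 1) (p + PySem.List.pyGetD A b 0) v (by omega)]
      have hbb : b - 1 + 1 = b := by ring
      rw [hbb]
      rw [PySem.List.pyRange_one_succ_right h0']
      rw [List.map_append, List.sum_append]
      have hmap : (PySem.List.pyRange 0 b).map
            (fun i => if p + pvSS A i (b + 1) = v then (1:Int) else 0) =
          (PySem.List.pyRange 0 b).map
            (fun i => if p + PySem.List.pyGetD A b 0 + pvSS A i b = v then (1:Int) else 0) := by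
        apply List.map_congr_left
        intro i hi
        have hib := PySem.List.mem_pyRange_one.mp hi
        rw [pvSS_snoc A (show i ≤ b by omega)]
        have : p + (pvSS A i b + PySem.List.pyGetD A b 0) =
            p + PySem.List.pyGetD A b 0 + pvSS A i b := by ring
        rw [this]
      rw [hmap]
      simp [pvSS_single]
      ring

theorem pvRows_append (A : List Int) (N : Int) (v s : Int) : ∀ (ss : List Int),
    pvRows A N (ss ++ [s]) v = pvRows A N ss v ++ pvRow A 0 (PySem.List.pyRange s N) v := by
  intro ss
  induction ss with
  | nil => simp [pvRows]
  | cons s' ss ih => simp [pvRows, ih]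

theorem pvCSpec_append (A : List Int) (v s : Int) : ∀ (ss : List Int),
    pvCSpec A (ss ++ [s]) v =
      pvCSpec A ss v + pvOcc A 0 (PySem.List.pyRange (s - 1) (-1) (-1)) v := by
  intro ss
  induction ss with
  | nil => simp [pvCSpec]
  | cons s' ss ih => simp [pvCSpec, ih]; ring

theorem pvCntEq_rows (A : List Int) (N t v : Int) : ∀ (ss : List Int),
    pvCntEq t (pvRows A N ss v) =
      (ss.map (fun s => pvCntEq t (pvRow A 0 (PySem.List.pyRange s N) v))).sum := by
  intro ss
  induction ss with
  | nil => simp [pvRows, pvCntEq]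
  | cons s ss ih => simp [pvRows, pvCntEq_append, ih]

-- MAIN bridge: counting the entries < t in A's dict (rows 0..t-1) at key v equals
-- B's counter value at v after the pre-loops of rows 0..t.
theorem pvMain (A : List Int) (N : Int) : ∀ (k : Nat) (t v : Int), t = (k : Int) → t ≤ N →
    pvCntLt t (pvRows A N (PySem.List.pyRange 0 t) v) =
      pvCSpec A (PySem.List.pyRange 0 (t + 1)) v := by
  intro k
  induction k with
  | zero =>
    intro t v ht htN
    have ht0 : t = 0 := by omega
    subst ht0
    have e1 : PySem.List.pyRange (0:Int) 0 = [] := PySem.List.pyRange_one_eq_nil le_rfl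
    have e2 : PySem.List.pyRange (0:Int) (0 + 1) = [(0:Int)] := PySem.List.pyRange_one_singleton 0
    have e3 : PySem.List.pyRange ((0:Int) - 1) (-1) (-1) = [] :=
      PySem.List.pyRange_neg_one_eq_nil (by omega)
    rw [e1, e2]
    simp [pvRows, pvCntLt, pvCSpec, pvOcc]
  | succ k ih =>
    intro t v ht htN
    obtain ⟨u, rfl, hu⟩ : ∃ u : Int, t = u + 1 ∧ u = (k : Int) := ⟨t - 1, by omega, by omega⟩
    have hu0 : (0:Int) ≤ u := by omega
    have huN : u < N := by omega
    have hsplit : PySem.List.pyRange 0 (u + 1) = PySem.List.pyRange 0 u ++ [u] :=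
      PySem.List.pyRange_one_succ_right hu0
    rw [hsplit, pvRows_append, pvCntLt_append, pvCntLt_succ]
    rw [ih u v hu (by omega)]
    rw [pvCntEq_rows]
    have hmap : (PySem.List.pyRange 0 u).map
          (fun s => pvCntEq u (pvRow A 0 (PySem.List.pyRange s N) v)) =
        (PySem.List.pyRange 0 u).map
          (fun s => if 0 + pvSS A s (u + 1) = v then (1:Int) else 0) := by
      apply List.map_congr_left
      intro s hs
      have hsb := PySem.List.mem_pyRange_one.mp hs
      exact pvR1 A N (u - s).toNat s 0 u v (by omega) huN
    rw [hmap]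
    have hrow : pvCntLt (u + 1) (pvRow A 0 (PySem.List.pyRange u N) v) =
        if 0 + pvSS A u (u + 1) = v then 1 else 0 := by
      rw [PySem.List.pyRange_one_cons huN]
      simp only [pvRow]
      rw [pvCntLt_append]
      have h2 : pvCntLt (u + 1)
          (pvRow A (0 + PySem.List.pyGetD A u 0) (PySem.List.pyRange (u + 1) N) v) = 0 := by
        apply pvCntLt_zero_of_ge
        intro x hx
        have := PySem.List.mem_pyRange_one.mp (pvRow_subset A v x _ _ hx)
        omega
      rw [h2, pvSS_single]
      split
      · simp [pvCntLt]
      · simp [pvCntLt]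
    rw [hrow]
    have hsplit2 : PySem.List.pyRange 0 (u + 1 + 1) = PySem.List.pyRange 0 (u + 1) ++ [u + 1] :=
      PySem.List.pyRange_one_succ_right (by omega)
    rw [hsplit2, pvCSpec_append, hsplit, pvCSpec_append]
    have e : u + 1 - 1 = u := by ring
    rw [e]
    rw [pvO1 A (k + 1) u 0 v (by omega)]
    rw [hsplit, List.map_append, List.sum_append]
    simp only [List.map_cons, List.map_nil, List.sum_cons, List.sum_nil]
    ring

-- pointwise-equal query functions give equal row totals
theorem pvAdds_congr (A : List Int) (f g : Int → Int) (h : ∀ v, f v = g v) :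
    ∀ (es : List Int) (p : Int), pvAdds A f p es = pvAdds A g p es := by
  intro es
  induction es with
  | nil => intro p; rfl
  | cons e es ih => intro p; simp [pvAdds, h, ih]

-- L1: one row of A appends pvRow under each key and adds the row total queried
-- against the < start counts of the dict at row entry.
theorem pvAInner_spec (A : List Int) (start : Int) : ∀ (es : List Int) (p : Int)
    (d : PySem.Dict Int (List Int)) (res : Int), (∀ e ∈ es, start ≤ e) →
    (∀ v, (pvAInner A start es (p, d, res)).2.1.getD v [] = d.getD v [] ++ pvRow A p es v) ∧
    (pvAInner A start es (p, d, res)).2.2 =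
      res + pvAdds A (fun v => pvCntLt start (d.getD v [])) p es := by
  intro es
  induction es with
  | nil => intro p d res _; simp [pvAInner, pvRow, pvAdds]
  | cons e es ih =>
    intro p d res hmem
    have hstep : pvAInner A start (e :: es) (p, d, res) =
        pvAInner A start es
          (p + PySem.List.pyGetD A e 0,
           d.insert (p + PySem.List.pyGetD A e 0)
             (d.getD (p + PySem.List.pyGetD A e 0) [] ++ [e]),
           (d.getD (p + PySem.List.pyGetD A e 0) []).foldl
             (fun r q => if q < start then r + 1 else r) res) := by
      simp [pvAInner]
    set ps := p + PySem.List.pyGetD A e 0 with hps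
    set d1 := d.insert ps (d.getD ps [] ++ [e]) with hd1
    have hse : start ≤ e := hmem e (by simp)
    have hd1v : ∀ v, d1.getD v [] = d.getD v [] ++ (if ps = v then [e] else []) := by
      intro v
      rw [hd1, PySem.Dict.getD_insert]
      split
      · rename_i hv; subst hv; simp
      · rename_i hv; simp [show ¬ ps = v by omega]
    have hcnt : ∀ v, pvCntLt start (d1.getD v []) = pvCntLt start (d.getD v []) := by
      intro v
      rw [hd1v v, pvCntLt_append]
      split <;> simp [pvCntLt, show ¬ e < start by omega]
    obtain ⟨ihd, ihr⟩ := ih ps d1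
      ((d.getD ps []).foldl (fun r q => if q < start then r + 1 else r) res)
      (fun x hx => hmem x (by simp [hx]))
    constructor
    · intro v
      rw [hstep, ihd v, hd1v v]
      simp only [pvRow, ← hps]
      rw [List.append_assoc]
    · rw [hstep, ihr, pvFoldl_cnt]
      rw [pvAdds_congr A _ _ hcnt]
      simp only [pvAdds, ← hps]
      ring

-- L3: one row of B adds the row total queried against the counts dict.
theorem pvBInner_spec (A : List Int) (cnt : PySem.Dict Int Int) : ∀ (es : List Int) (p res : Int),
    (pvBInner A cnt es (p, res)).2 = res + pvAdds A (fun v => cnt.getD v 0) p es := by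
  intro es
  induction es with
  | nil => intro p res; simp [pvBInner, pvAdds]
  | cons e es ih =>
    intro p res
    have hstep : pvBInner A cnt (e :: es) (p, res) =
        pvBInner A cnt es (p + PySem.List.pyGetD A e 0,
          res + cnt.getD (p + PySem.List.pyGetD A e 0) 0) := by
      simp [pvBInner]
    rw [hstep, ih]
    simp only [pvAdds]
    ring

-- L4: B's pre-loop adds pvOcc to each key of the counts dict.
theorem pvBPre_spec (A : List Int) : ∀ (is : List Int) (p : Int) (cnt : PySem.Dict Int Int)
    (v : Int), ((pvBPre A is (p, cnt)).2).getD v 0 = cnt.getD v 0 + pvOcc A p is v := by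
  intro is
  induction is with
  | nil => intro p cnt v; simp [pvBPre, pvOcc]
  | cons i is ih =>
    intro p cnt v
    have hstep : pvBPre A (i :: is) (p, cnt) =
        pvBPre A is (p + PySem.List.pyGetD A i 0,
          cnt.insert (p + PySem.List.pyGetD A i 0)
            (cnt.getD (p + PySem.List.pyGetD A i 0) 0 + 1)) := by
      simp [pvBPre]
    rw [hstep, ih]
    rw [PySem.Dict.getD_insert]
    simp only [pvOcc]
    split
    · rename_i hv; subst hv; rw [if_pos rfl]; ring
    · rename_i hv
      rw [if_neg (fun h => hv h.symm)]
      ring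

-- OUTER simulation: from synchronized states (A's dict = pvRows of the processed rows,
-- B's counts = pvCSpec of the processed pre-loops, equal results) the two folds agree.
theorem pvOuter (A : List Int) (N : Int) : ∀ (k : Nat) (t : Int)
    (d : PySem.Dict Int (List Int)) (cnt : PySem.Dict Int Int) (r : Int),
    0 ≤ t → t + (k : Int) = N →
    (∀ v, d.getD v [] = pvRows A N (PySem.List.pyRange 0 t) v) →
    (∀ v, cnt.getD v 0 = pvCSpec A (PySem.List.pyRange 0 t) v) →
    ((PySem.List.pyRange t N).foldl (pvAStep N A) (d, r)).2 =
      ((PySem.List.pyRange t N).foldl (pvBStep N A) (cnt, r)).2 := by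
  intro k
  induction k with
  | zero =>
    intro t d cnt r ht htN hd hcnt
    rw [PySem.List.pyRange_one_eq_nil (by omega)]
    simp
  | succ k ih =>
    intro t d cnt r ht htN hd hcnt
    have htN' : t < N := by omega
    rw [PySem.List.pyRange_one_cons htN']
    simp only [List.foldl_cons]
    -- characterize B's step
    have hcnt' : ∀ v, ((pvBPre A (PySem.List.pyRange (t - 1) (-1) (-1)) (0, cnt)).2).getD v 0 =
        pvCSpec A (PySem.List.pyRange 0 (t + 1)) v := by
      intro v
      rw [pvBPre_spec, hcnt v]
      have hsplit : PySem.List.pyRange 0 (t + 1) = PySem.List.pyRange 0 t ++ [t] :=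
        PySem.List.pyRange_one_succ_right (by omega)
      rw [hsplit, pvCSpec_append]
    -- characterize A's step
    have hmem : ∀ e ∈ PySem.List.pyRange t N, t ≤ e := by
      intro e he; exact (PySem.List.mem_pyRange_one.mp he).1
    obtain ⟨hAd, hAr⟩ := pvAInner_spec A t (PySem.List.pyRange t N) 0 d r hmem
    -- the two row totals agree
    have hqeq : ∀ v, pvCntLt t (d.getD v []) =
        ((pvBPre A (PySem.List.pyRange (t - 1) (-1) (-1)) (0, cnt)).2).getD v 0 := by
      intro v
      rw [hd v, hcnt' v]
      exact pvMain A N t.toNat t v (by omega) (by omega)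
    have hres : (pvAInner A t (PySem.List.pyRange t N) (0, d, r)).2.2 =
        (pvBInner A ((pvBPre A (PySem.List.pyRange (t - 1) (-1) (-1)) (0, cnt)).2)
          (PySem.List.pyRange t N) (0, r)).2 := by
      rw [hAr, pvBInner_spec]
      congr 1
      exact pvAdds_congr A _ _ hqeq _ _
    -- apply IH at t + 1
    have hd2 : ∀ v, (pvAInner A t (PySem.List.pyRange t N) (0, d, r)).2.1.getD v [] =
        pvRows A N (PySem.List.pyRange 0 (t + 1)) v := by
      intro v
      rw [hAd v, hd v]
      have hsplit : PySem.List.pyRange 0 (t + 1) = PySem.List.pyRange 0 t ++ [t] :=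
        PySem.List.pyRange_one_succ_right (by omega)
      rw [hsplit, pvRows_append]
    have hih := ih (t + 1)
      (pvAInner A t (PySem.List.pyRange t N) (0, d, r)).2.1
      ((pvBPre A (PySem.List.pyRange (t - 1) (-1) (-1)) (0, cnt)).2)
      (pvAInner A t (PySem.List.pyRange t N) (0, d, r)).2.2
      (by omega) (by omega) hd2 hcnt'
    simp only [pvAStep, pvBStep]
    rw [← hres]
    exact hih

-- ===== VERDICT (by name: the statement is the Claim_ definition above) =====
theorem find_subarray_pairs_spec : Claim_equal_find_subarray_pairs := by
  intro N A _ _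
  unfold Spec_find_subarray_pairs find_subarray_pairs find_subarray_pairs_alt
  by_cases hN : N ≤ 0
  · rw [PySem.List.pyRange_one_eq_nil hN]; simp
  · have hN' : 0 < N := by omega
    apply pvOuter A N N.toNat 0 PySem.Dict.empty PySem.Dict.empty 0 (by omega) (by omega)
    · intro v
      rw [PySem.List.pyRange_one_eq_nil (by omega)]
      simp [pvRows, PySem.Dict.getD_empty]
    · intro v
      rw [PySem.List.pyRange_one_eq_nil (by omega)]
      simp [pvCSpec, PySem.Dict.getD_empty]
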